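-- pv_equiv track=rewrite | github.com/olibdpro/ssh_over_clipboard | src/gitssh/git_transport.py | _is_non_fast_forward_error
-- ===== SOURCE A (Python) =====
-- def _is_non_fast_forward_error(message: str) -> bool:
--     lowered = message.lower()
--     patterns = (
--         "non-fast-forward",
--         "fetch first",
--         "rejected",
--         "failed to push some refs",
--     )
--     return any(pattern in lowered for pattern in patterns)
-- ===== SOURCE B (Python) =====
-- def _is_non_fast_forward_error(message: str) -> bool:
--     lowered = message.lower()
--     patterns = ("non-fast-forward", "fetch first", "rejected", "failed to push some refs")
--     # single positional scan: at each index, test whether some pattern starts there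
--     return any(lowered.startswith(p, i) for i in range(len(lowered)) for p in patterns)
-- ===== Notes on version B (the rewrite author's own statement) =====
-- stated objective: alternative
-- what changed: Replaces four independent whole-string substring-membership searches with a single left-to-right positional scan of the lowered message that tests, at each index, whether any of the four patterns starts there.
import Mathlib
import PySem

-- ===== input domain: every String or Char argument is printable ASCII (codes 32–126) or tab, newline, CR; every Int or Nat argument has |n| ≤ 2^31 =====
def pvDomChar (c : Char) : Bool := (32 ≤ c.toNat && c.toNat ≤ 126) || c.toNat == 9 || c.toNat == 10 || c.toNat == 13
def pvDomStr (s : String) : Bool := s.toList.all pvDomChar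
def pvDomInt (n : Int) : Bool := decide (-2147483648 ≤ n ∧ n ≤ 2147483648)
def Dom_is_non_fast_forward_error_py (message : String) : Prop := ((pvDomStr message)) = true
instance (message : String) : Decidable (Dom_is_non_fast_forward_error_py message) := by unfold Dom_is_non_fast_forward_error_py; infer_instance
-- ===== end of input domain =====

-- B replaces four independent substring searches with one positional scan testing each pattern's start; objective: alternative.


-- ===== PORT A =====
def is_non_fast_forward_error_py (message : String) : Bool :=
  let lowered := PySem.Str.lower message
  let patterns : List String :=
    ["non-fast-forward", "fetch first", "rejected", "failed to push some refs"]
  patterns.any (fun pattern => PySem.Str.isIn pattern lowered)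

-- ===== PORT B =====
def altPatterns : List String :=
  ["non-fast-forward", "fetch first", "rejected", "failed to push some refs"]

-- the index loop 'for i in range(len(lowered))' as structural recursion over the suffixes of lowered
def altScan (s : List Char) : Bool :=
  match s with
  | [] => false
  | c :: rest =>
    if altPatterns.any (fun pattern => PySem.Chars.startswith (c :: rest) pattern.toList) then
      true
    else
      altScan rest

def is_non_fast_forward_error_py_alt (message : String) : Bool :=
  altScan (PySem.Str.lower message).toList

-- ===== PRECONDITION & SPEC =====
def Spec_is_non_fast_forward_error_py (message : String) (out : Bool) : Prop := out = is_non_fast_forward_error_py_alt message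
instance (message : String) (out : Bool) : Decidable (Spec_is_non_fast_forward_error_py message out) := by unfold Spec_is_non_fast_forward_error_py; infer_instance

-- ===== CLAIM (what is proved, stated in full; the proofs are below) =====
def Claim_equal_is_non_fast_forward_error_py : Prop := ∀ (message : String), Dom_is_non_fast_forward_error_py message → Spec_is_non_fast_forward_error_py message (is_non_fast_forward_error_py message)

-- ===== LEMMAS AND PROOFS =====

lemma altScan_eq_any_isIn (l : List Char) :
    altScan l = altPatterns.any (fun p => PySem.Chars.isIn p.toList l) := by
  induction l with
  | nil => decide
  | cons c rest ih =>
    rw [altScan]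
    split_ifs with h
    · rcases List.any_eq_true.mp h with ⟨p, hp, hsw⟩
      symm
      refine List.any_eq_true.mpr ⟨p, hp, ?_⟩
      exact (PySem.Chars.isIn_iff_infix _ _).mpr
        (List.infix_cons_iff.mpr (Or.inl ((PySem.Chars.startswith_iff _ _).mp hsw)))
    · rw [ih]
      cases hb : altPatterns.any (fun p => PySem.Chars.isIn p.toList (c :: rest)) with
      | false =>
        cases hb' : altPatterns.any (fun p => PySem.Chars.isIn p.toList rest) with
        | false => rfl
        | true =>
          exfalso
          rcases List.any_eq_true.mp hb' with ⟨p, hp, hin⟩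
          have : PySem.Chars.isIn p.toList (c :: rest) = true :=
            (PySem.Chars.isIn_iff_infix _ _).mpr
              (List.infix_cons_iff.mpr (Or.inr ((PySem.Chars.isIn_iff_infix _ _).mp hin)))
          have h2 : altPatterns.any (fun p => PySem.Chars.isIn p.toList (c :: rest)) = true :=
            List.any_eq_true.mpr ⟨p, hp, this⟩
          simp [hb] at h2
      | true =>
        rcases List.any_eq_true.mp hb with ⟨p, hp, hin⟩
        rcases List.infix_cons_iff.mp ((PySem.Chars.isIn_iff_infix _ _).mp hin) with hpre | hinf
        · exfalso
          exact h (List.any_eq_true.mpr ⟨p, hp, (PySem.Chars.startswith_iff _ _).mpr hpre⟩)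
        · exact List.any_eq_true.mpr ⟨p, hp, (PySem.Chars.isIn_iff_infix _ _).mpr hinf⟩

-- ===== VERDICT (by name: the statement is the Claim_ definition above) =====
theorem is_non_fast_forward_error_py_spec : Claim_equal_is_non_fast_forward_error_py := by
  intro message _
  unfold Spec_is_non_fast_forward_error_py is_non_fast_forward_error_py is_non_fast_forward_error_py_alt
  rw [altScan_eq_any_isIn]
  simp [altPatterns, PySem.Str.isIn]
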